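-- pv_equiv track=rewrite | github.com/sumanth-naik/Striver-191 | incomplete/transformToChessboard.py | calcNumR1AndR2
-- ===== SOURCE A (Python) =====
-- def calcNumR1AndR2(matrix, r1, r2):
--     numR1 = 0
--     numR2 = 0
--     numOther = 0
--     for arr in matrix:
--         if arr == r1: numR1 += 1
--         elif arr == r2: numR2 += 1
--         else: numOther += 1
--
--     return (numR1, numR2, numOther)
-- ===== SOURCE B (Python) =====
-- def calcNumR1AndR2(matrix, r1, r2):
--     numR1 = matrix.count(r1)
--     numR2 = 0 if r1 == r2 else matrix.count(r2)
--     return (numR1, numR2, len(matrix) - numR1 - numR2)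
-- ===== Notes on version B (the rewrite author's own statement) =====
-- stated objective: simpler
-- what changed: Replaces the single pass with per-branch counting: list.count for r1 and r2 (r2 count suppressed when r1 == r2, matching the elif), remainder by subtraction from len(matrix).
import Mathlib
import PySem

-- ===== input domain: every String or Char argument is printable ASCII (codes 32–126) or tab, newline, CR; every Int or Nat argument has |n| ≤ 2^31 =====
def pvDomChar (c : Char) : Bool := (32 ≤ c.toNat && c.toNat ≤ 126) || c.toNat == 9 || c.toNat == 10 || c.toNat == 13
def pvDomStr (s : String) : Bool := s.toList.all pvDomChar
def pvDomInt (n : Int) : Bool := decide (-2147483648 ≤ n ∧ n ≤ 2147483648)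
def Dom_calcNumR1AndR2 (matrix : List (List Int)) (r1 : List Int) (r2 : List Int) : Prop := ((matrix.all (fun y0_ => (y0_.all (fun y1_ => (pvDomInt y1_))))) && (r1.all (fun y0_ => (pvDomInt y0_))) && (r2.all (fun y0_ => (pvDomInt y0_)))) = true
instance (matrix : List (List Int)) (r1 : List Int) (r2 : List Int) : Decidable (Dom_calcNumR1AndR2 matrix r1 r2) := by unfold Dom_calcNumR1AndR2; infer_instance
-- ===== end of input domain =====

-- B replaces A's single accumulating pass by per-branch list.count calls (simpler decomposition; same O(n) cost).


-- ===== PORT A =====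
-- the for-loop over matrix with the three counters as accumulator state
def calcNumR1AndR2 (matrix : List (List Int)) (r1 : List Int) (r2 : List Int) : Int × Int × Int :=
  matrix.foldl
    (fun s arr =>
      if arr = r1 then (s.1 + 1, s.2.1, s.2.2)
      else if arr = r2 then (s.1, s.2.1 + 1, s.2.2)
      else (s.1, s.2.1, s.2.2 + 1))
    (0, 0, 0)

-- ===== PORT B =====
def calcNumR1AndR2_alt (matrix : List (List Int)) (r1 : List Int) (r2 : List Int) : Int × Int × Int :=
  let numR1 : Int := PySem.List.count matrix r1
  let numR2 : Int := if r1 = r2 then 0 else PySem.List.count matrix r2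
  (numR1, numR2, (matrix.length : Int) - numR1 - numR2)

-- ===== PRECONDITION & SPEC =====
def Spec_calcNumR1AndR2 (matrix : List (List Int)) (r1 : List Int) (r2 : List Int) (out : Int × Int × Int) : Prop := out = calcNumR1AndR2_alt matrix r1 r2
instance (matrix : List (List Int)) (r1 : List Int) (r2 : List Int) (out : Int × Int × Int) : Decidable (Spec_calcNumR1AndR2 matrix r1 r2 out) := by unfold Spec_calcNumR1AndR2; infer_instance

-- ===== CLAIM (what is proved, stated in full; the proofs are below) =====
def Claim_equal_calcNumR1AndR2 : Prop := ∀ (matrix : List (List Int)) (r1 : List Int) (r2 : List Int), Dom_calcNumR1AndR2 matrix r1 r2 → Spec_calcNumR1AndR2 matrix r1 r2 (calcNumR1AndR2 matrix r1 r2)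

-- ===== LEMMAS AND PROOFS =====

-- A's loop from accumulator (a, b, c), in closed form via counts (elif: a row equal to both r1 and r2 counts only for r1).
theorem calcNumR1AndR2_foldl_closed (r1 r2 : List Int) (l : List (List Int)) :
    ∀ a b c : Int,
    l.foldl
      (fun s arr =>
        if arr = r1 then (s.1 + 1, s.2.1, s.2.2)
        else if arr = r2 then (s.1, s.2.1 + 1, s.2.2)
        else (s.1, s.2.1, s.2.2 + 1))
      (a, b, c)
    = (a + (l.count r1 : Int),
       b + (if r1 = r2 then 0 else (l.count r2 : Int)),
       c + ((l.length : Int) - (l.count r1 : Int) - (if r1 = r2 then 0 else (l.count r2 : Int)))) := by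
  induction l with
  | nil => intro a b c; simp
  | cons x t ih =>
      intro a b c
      simp only [List.foldl_cons]
      rcases eq_or_ne x r1 with h1 | h1 <;> rcases eq_or_ne x r2 with h2 | h2 <;>
        rcases eq_or_ne r1 r2 with h3 | h3 <;>
        simp_all [ih, List.count_cons, Prod.ext_iff] <;>
        push_cast <;> omega

-- ===== VERDICT (by name: the statement is the Claim_ definition above) =====
theorem calcNumR1AndR2_spec : Claim_equal_calcNumR1AndR2 := by
  intro matrix r1 r2 _
  show calcNumR1AndR2 matrix r1 r2 = calcNumR1AndR2_alt matrix r1 r2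
  rw [calcNumR1AndR2, calcNumR1AndR2_foldl_closed]
  simp [calcNumR1AndR2_alt, PySem.List.count]
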